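-- pv_equiv track=rewrite | github.com/johannesnicolaus/TOGA2 | src/python/modules/cesar_wrapper_executables.py | get_d_runs
-- ===== SOURCE A (Python) =====
-- from typing import Any, Dict, Iterable, List, Set, TextIO, Tuple, Union
--
-- def get_d_runs(exon_states: Dict[int, str]) -> List[List[int]]:
--     """
--     Of the ordered exon presence state list, select consecutively deleted exons'
--     streaks
--     """
--     out_list: List[List[int]] = []
--     curr_group: List[int] = []
--     for i, state in exon_states.items():
--         if state == "D":
--             curr_group.append(i)
--         elif curr_group:
--             out_list.append(curr_group)
--             curr_group = []
--     if curr_group: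
--         out_list.append(curr_group)
--     return out_list
-- ===== SOURCE B (Python) =====
-- from typing import Dict, List
--
--
-- def get_d_runs(exon_states: Dict[int, str]) -> List[List[int]]:
--     """
--     Of the ordered exon presence state list, select consecutively deleted exons'
--     streaks
--     """
--     keys = list(exon_states)
--     mask = [s == "D" for s in exon_states.values()]
--     n = len(mask)
--     starts = [j for j in range(n) if mask[j] and (j == 0 or not mask[j - 1])]
--     ends = [j + 1 for j in range(n) if mask[j] and (j == n - 1 or not mask[j + 1])]
--     return [keys[a:b] for a, b in zip(starts, ends)]
-- ===== Notes on version B (the rewrite author's own statement) =====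
-- stated objective: alternative
-- what changed: Instead of threading a curr_group accumulator through one pass, B computes a boolean deletion mask, finds run-start and run-end boundary indices in two staged passes, and slices the key list between paired boundaries.
import Mathlib
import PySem

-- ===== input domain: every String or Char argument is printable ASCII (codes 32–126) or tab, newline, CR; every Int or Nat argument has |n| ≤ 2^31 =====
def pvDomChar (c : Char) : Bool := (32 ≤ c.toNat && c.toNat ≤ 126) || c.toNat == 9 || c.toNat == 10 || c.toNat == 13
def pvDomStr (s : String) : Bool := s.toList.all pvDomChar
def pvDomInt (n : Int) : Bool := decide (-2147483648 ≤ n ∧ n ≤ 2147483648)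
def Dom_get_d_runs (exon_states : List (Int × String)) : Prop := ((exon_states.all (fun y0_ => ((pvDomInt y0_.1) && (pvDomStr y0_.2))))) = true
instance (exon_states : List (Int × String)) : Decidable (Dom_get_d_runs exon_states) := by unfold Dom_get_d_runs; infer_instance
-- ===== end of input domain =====

-- B replaces A's single pass with a flushed accumulator by a staged boundary computation:
-- build the deletion mask, locate run starts and run ends as index lists, slice the keys between paired boundaries (alternative decomposition, same cost).

-- ===== PORT A =====
-- Literal port of A: fold over the items with state (out_list, curr_group), then flush.
def stepA (acc : List (List Int) × List Int) (p : Int × String) : List (List Int) × List Int :=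
  if p.2 == "D" then (acc.1, acc.2 ++ [p.1])
  else if acc.2 ≠ [] then (acc.1 ++ [acc.2], [])
  else acc

def get_d_runs (exon_states : List (Int × String)) : List (List Int) :=
  let st := exon_states.foldl stepA ([], [])
  if st.2 ≠ [] then st.1 ++ [st.2] else st.1

-- ===== PORT B =====
-- Source B's staged passes, helper by helper:
-- starts = [j for j in range(n) if mask[j] and (j == 0 or not mask[j - 1])]
def startsOf (mask : List Bool) : List Nat :=
  (List.range mask.length).filter
    (fun j => mask.getD j false && (j == 0 || !(mask.getD (j - 1) false)))

-- ends = [j + 1 for j in range(n) if mask[j] and (j == n - 1 or not mask[j + 1])]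
def endsOf (mask : List Bool) : List Nat :=
  ((List.range mask.length).filter
    (fun j => mask.getD j false && (j == mask.length - 1 || !(mask.getD (j + 1) false)))).map (· + 1)

-- keys[a:b] with 0 ≤ a ≤ b ≤ len(keys) (all produced boundaries are in range) is exactly drop-then-take
def get_d_runs_alt (exon_states : List (Int × String)) : List (List Int) :=
  let keys := exon_states.map Prod.fst
  let mask := exon_states.map (fun p => p.2 == "D")
  ((startsOf mask).zip (endsOf mask)).map (fun ab => (keys.drop ab.1).take (ab.2 - ab.1))

-- ===== PRECONDITION & SPEC =====
def Spec_get_d_runs (exon_states : List (Int × String)) (out : List (List Int)) : Prop := out = get_d_runs_alt exon_states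
instance (exon_states : List (Int × String)) (out : List (List Int)) : Decidable (Spec_get_d_runs exon_states out) := by unfold Spec_get_d_runs; infer_instance

-- ===== CLAIM (what is proved, stated in full; the proofs are below) =====
def Claim_equal_get_d_runs : Prop := ∀ (exon_states : List (Int × String)), Dom_get_d_runs exon_states → Spec_get_d_runs exon_states (get_d_runs exon_states)

-- ===== LEMMAS AND PROOFS =====

-- Canonical one-step recursion computing the deleted runs: both ports are reduced to R.
def R : List (Int × String) → List (List Int)
  | [] => []
  | (k, s) :: t =>
    if s == "D" then
      if (t.headD (0, "")).2 == "D" then (k :: (R t).headD []) :: (R t).tail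
      else [k] :: R t
    else R t

theorem R_cons_D (k : Int) (t : List (Int × String)) :
    R ((k, "D") :: t) =
      if (t.headD (0, "")).2 == "D" then (k :: (R t).headD []) :: (R t).tail
      else [k] :: R t := by
  rw [R]; simp

theorem R_cons_nonD (k : Int) (s : String) (t : List (Int × String)) (hs : ¬ s = "D") :
    R ((k, s) :: t) = R t := by
  rw [R]; simp [hs]

theorem R_headD_tail (t : List (Int × String)) (ht : ((t.headD (0, "")).2 == "D") = true) :
    (R t).headD [] :: (R t).tail = R t := by
  cases t with
  | nil => simp at ht
  | cons q u =>
    obtain ⟨k2, s2⟩ := q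
    simp only [List.headD_cons, beq_iff_eq] at ht
    subst ht
    rw [R_cons_D]
    split_ifs <;> simp

-- Recursive rendering of A's loop.
def loopG : List (Int × String) → List Int → List (List Int)
  | [], curr => if curr ≠ [] then [curr] else []
  | (i, s) :: rest, curr =>
    if s == "D" then loopG rest (curr ++ [i])
    else if curr ≠ [] then [curr] ++ loopG rest []
    else loopG rest []

theorem loopG_cons_D (k : Int) (t : List (Int × String)) (curr : List Int) :
    loopG ((k, "D") :: t) curr = loopG t (curr ++ [k]) := by
  rw [loopG]; simp

theorem loopG_cons_nonD (k : Int) (s : String) (t : List (Int × String)) (curr : List Int)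
    (hs : ¬ s = "D") :
    loopG ((k, s) :: t) curr = (if curr ≠ [] then [curr] else []) ++ loopG t [] := by
  rw [loopG]
  rw [if_neg (by simp [hs])]
  split_ifs <;> simp

theorem foldl_eq_loopG (es : List (Int × String)) :
    ∀ (out : List (List Int)) (curr : List Int),
      (let st := es.foldl stepA (out, curr)
       if st.2 ≠ [] then st.1 ++ [st.2] else st.1) = out ++ loopG es curr := by
  induction es with
  | nil =>
    intro out curr
    simp only [List.foldl_nil, loopG]
    split_ifs <;> simp
  | cons p t ih =>
    intro out curr
    obtain ⟨i, s⟩ := p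
    rw [List.foldl_cons]
    by_cases hd : (s == "D") = true
    · have hstep : stepA (out, curr) (i, s) = (out, curr ++ [i]) := by simp [stepA, hd]
      have hL : loopG ((i, s) :: t) curr = loopG t (curr ++ [i]) := by simp [loopG, hd]
      rw [hstep, hL]; exact ih out (curr ++ [i])
    · by_cases hc : curr = []
      · subst hc
        have hstep : stepA (out, []) (i, s) = (out, []) := by simp [stepA, hd]
        have hL : loopG ((i, s) :: t) [] = loopG t [] := by simp [loopG, hd]
        rw [hstep, hL]; exact ih out []
      · have hstep : stepA (out, curr) (i, s) = (out ++ [curr], []) := by simp [stepA, hd, hc]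
        have hL : loopG ((i, s) :: t) curr = [curr] ++ loopG t [] := by simp [loopG, hd, hc]
        rw [hstep, hL, ih (out ++ [curr]) []]; simp

-- A's loop with pending group, expressed through R.
theorem loopG_eq_R (es : List (Int × String)) :
    ∀ (curr : List Int),
      loopG es curr =
        if (es.headD (0, "")).2 == "D" then (curr ++ (R es).headD []) :: (R es).tail
        else (if curr ≠ [] then [curr] else []) ++ R es := by
  induction es with
  | nil => intro curr; simp [loopG, R]
  | cons p t ih =>
    intro curr
    obtain ⟨k, s⟩ := p
    by_cases hd : s = "D"
    · subst hd
      rw [loopG_cons_D, ih (curr ++ [k]), R_cons_D]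
      rw [if_pos (show ((((k, "D") :: t).headD (0, "")).2 == "D") = true by simp)]
      by_cases ht : ((t.headD (0, "")).2 == "D") = true
      · rw [if_pos ht, if_pos ht]
        simp [List.append_assoc]
      · rw [if_neg ht, if_neg ht]
        rw [if_pos (show curr ++ [k] ≠ [] by simp)]
        simp
    · rw [loopG_cons_nonD _ _ _ _ hd, R_cons_nonD _ _ _ hd]
      rw [if_neg (show ¬ ((((k, s) :: t).headD (0, "")).2 == "D") = true by simp [hd])]
      have htail : loopG t [] = R t := by
        rw [ih []]
        by_cases ht : ((t.headD (0, "")).2 == "D") = true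
        · rw [if_pos ht, List.nil_append]
          exact R_headD_tail t ht
        · rw [if_neg ht]; simp
      rw [htail]

-- A computes R.
theorem get_d_runs_eq_R (es : List (Int × String)) : get_d_runs es = R es := by
  have h := foldl_eq_loopG es [] []
  simp only [List.nil_append] at h
  rw [get_d_runs, h, loopG_eq_R es []]
  by_cases ht : ((es.headD (0, "")).2 == "D") = true
  · rw [if_pos ht, List.nil_append]
    exact R_headD_tail es ht
  · rw [if_neg ht]; simp


-- ----- B-side: how startsOf/endsOf evolve across one leading mask entry -----

theorem filter_range_succ (p : Nat → Bool) (n : Nat) :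
    (List.range (n + 1)).filter p =
      (if p 0 then [0] else []) ++ ((List.range n).filter (fun j => p (j + 1))).map (· + 1) := by
  have h : List.range (n + 1) = 0 :: (List.range n).map (fun j => j + 1) := by
    simp [List.range_succ_eq_map]
  rw [h, List.filter_cons, List.filter_map]
  split_ifs <;> simp [Function.comp_def]

theorem starts_cons_false (m : List Bool) :
    startsOf (false :: m) = (startsOf m).map (· + 1) := by
  unfold startsOf
  rw [List.length_cons, filter_range_succ]
  simp only [List.getD_cons_zero, List.getD_cons_succ, Bool.false_and, Bool.false_eq_true,
    if_false, List.nil_append]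
  congr 1
  apply List.filter_congr
  intro j _
  cases j <;> simp

theorem starts_cons_true_false (m : List Bool) (h0 : m.getD 0 false = false) :
    startsOf (true :: m) = 0 :: (startsOf m).map (· + 1) := by
  have h0' : m[0]?.getD false = false := by simpa [List.getD_eq_getElem?_getD] using h0
  unfold startsOf
  rw [List.length_cons, filter_range_succ]
  simp only [List.getD_cons_zero, List.getD_cons_succ, beq_self_eq_true, Bool.true_or,
    Bool.and_self, if_true, List.cons_append, List.nil_append]
  congr 2
  apply List.filter_congr
  intro j _
  cases j with
  | zero => simp [h0']
  | succ i => simp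

theorem starts_cons_true_true (m : List Bool) (h0 : m.getD 0 false = true)
    (S : List Nat) (hS : startsOf m = 0 :: S) :
    startsOf (true :: m) = 0 :: S.map (· + 1) := by
  cases m with
  | nil => simp at h0
  | cons b m' =>
    simp only [List.getD_cons_zero] at h0; subst h0
    unfold startsOf
    rw [List.length_cons, filter_range_succ]
    simp only [List.getD_cons_zero, List.getD_cons_succ, beq_self_eq_true, Bool.true_or,
      Bool.and_self, if_true, List.cons_append, List.nil_append]
    congr 1
    unfold startsOf at hS
    rw [List.length_cons, filter_range_succ] at hS
    simp only [List.getD_cons_zero, List.getD_cons_succ, beq_self_eq_true, Bool.true_or,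
      Bool.and_self, if_true, List.cons_append, List.nil_append, List.cons.injEq, true_and] at hS
    rw [← hS]
    rw [List.length_cons, filter_range_succ]
    rw [if_neg (by simp)]
    rw [List.nil_append]
    congr 2

theorem ends_cons_false (m : List Bool) :
    endsOf (false :: m) = (endsOf m).map (· + 1) := by
  unfold endsOf
  rw [List.length_cons, filter_range_succ]
  simp only [List.getD_cons_zero, List.getD_cons_succ, Bool.false_and, Bool.false_eq_true,
    if_false, List.nil_append, List.map_map]
  congr 1
  apply List.filter_congr
  intro j hj
  rw [List.mem_range] at hj
  simp only [Nat.add_sub_cancel]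
  have hbeq : (j + 1 == m.length) = (j == m.length - 1) := by
    rw [Bool.eq_iff_iff]; simp; omega
  rw [hbeq]

theorem ends_cons_true_false (m : List Bool) (h0 : m.getD 0 false = false) :
    endsOf (true :: m) = 1 :: (endsOf m).map (· + 1) := by
  have h0' : m[0]?.getD false = false := by simpa [List.getD_eq_getElem?_getD] using h0
  unfold endsOf
  rw [List.length_cons, filter_range_succ]
  rw [if_pos (by cases m with
    | nil => simp
    | cons b m' => simp_all)]
  simp only [List.cons_append, List.nil_append, List.map_cons, List.map_map]
  congr 2
  apply List.filter_congr
  intro j hj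
  rw [List.mem_range] at hj
  simp only [List.getD_cons_succ, Nat.add_sub_cancel]
  have hbeq : (j + 1 == m.length) = (j == m.length - 1) := by
    rw [Bool.eq_iff_iff]; simp; omega
  rw [hbeq]

theorem ends_cons_true_true (m : List Bool) (h0 : m.getD 0 false = true) :
    endsOf (true :: m) = (endsOf m).map (· + 1) := by
  have h0' : m[0]?.getD false = true := by simpa [List.getD_eq_getElem?_getD] using h0
  have hm : m ≠ [] := by cases m <;> simp_all
  have hlen : m.length ≠ 0 := by simpa using hm
  unfold endsOf
  rw [List.length_cons, filter_range_succ]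
  rw [if_neg (by simp [h0']; omega)]
  simp only [List.nil_append, List.map_map]
  congr 1
  apply List.filter_congr
  intro j hj
  rw [List.mem_range] at hj
  simp only [List.getD_cons_succ, Nat.add_sub_cancel]
  have hbeq : (j + 1 == m.length) = (j == m.length - 1) := by
    rw [Bool.eq_iff_iff]; simp; omega
  rw [hbeq]

theorem ends_ne_nil (m : List Bool) (h0 : m.getD 0 false = true) : endsOf m ≠ [] := by
  induction m with
  | nil => simp at h0
  | cons b m' ih =>
    simp only [List.getD_cons_zero] at h0; subst h0
    by_cases h' : m'.getD 0 false = true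
    · rw [ends_cons_true_true m' h']
      simpa using ih h'
    · rw [ends_cons_true_false m' (by simpa using h')]
      simp

theorem starts_head (m : List Bool) (h0 : m.getD 0 false = true) :
    ∃ S, startsOf m = 0 :: S := by
  induction m with
  | nil => simp at h0
  | cons b m' ih =>
    simp only [List.getD_cons_zero] at h0; subst h0
    by_cases h' : m'.getD 0 false = true
    · obtain ⟨S, hS⟩ := ih h'
      exact ⟨_, starts_cons_true_true m' h' S hS⟩
    · exact ⟨_, starts_cons_true_false m' (by simpa using h')⟩
theorem slice_shift (k : Int) (keys : List Int) (a b : Nat) :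
    ((k :: keys).drop (a + 1)).take (b + 1 - (a + 1)) = (keys.drop a).take (b - a) := by
  simp [Nat.add_sub_add_right]

theorem mask_headD (t : List (Int × String)) :
    (t.map (fun p => p.2 == "D")).getD 0 false = ((t.headD (0, "")).2 == "D") := by
  cases t <;> simp

-- Main bridge: B computes R.
theorem alt_eq_R (es : List (Int × String)) : get_d_runs_alt es = R es := by
  induction es with
  | nil => simp [get_d_runs_alt, startsOf, endsOf, R]
  | cons p t ih =>
    obtain ⟨k, s⟩ := p
    rw [get_d_runs_alt]
    simp only [List.map_cons]
    by_cases hd : s = "D"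
    · subst hd
      rw [show (("D":String) == "D") = true by simp]
      by_cases ht : ((t.headD (0, "")).2 == "D") = true
      · -- run continues into the tail
        have h0 : (t.map (fun p => p.2 == "D")).getD 0 false = true := by
          rw [mask_headD]; exact ht
        obtain ⟨S, hS⟩ := starts_head _ h0
        obtain ⟨e0, E, hEeq⟩ : ∃ e0 E, endsOf (t.map (fun p => p.2 == "D")) = e0 :: E := by
          cases hE' : endsOf (t.map (fun p => p.2 == "D")) with
          | nil => exact absurd hE' (ends_ne_nil _ h0)
          | cons a l => exact ⟨a, l, rfl⟩
        rw [starts_cons_true_true _ h0 S hS, ends_cons_true_true _ h0, hEeq]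
        rw [R_cons_D, if_pos ht, ← ih, get_d_runs_alt]
        simp only [hS, hEeq]
        simp only [List.map_cons, List.zip_cons_cons, List.zip_map, List.map_map, List.map_cons]
        simp only [List.headD_cons, List.tail_cons, List.cons.injEq]
        constructor
        · simp [List.take_succ_cons]
        · apply List.map_congr_left
          intro ab _
          obtain ⟨a, b⟩ := ab
          simpa [Function.comp_def] using slice_shift k (t.map Prod.fst) a b
      · -- singleton start of a run
        have h0 : (t.map (fun p => p.2 == "D")).getD 0 false = false := by
          rw [mask_headD]; simpa using ht
        rw [starts_cons_true_false _ h0, ends_cons_true_false _ h0]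
        rw [R_cons_D, if_neg ht, ← ih, get_d_runs_alt]
        simp only [List.zip_cons_cons, List.zip_map, List.map_cons, List.map_map]
        simp only [List.cons.injEq]
        constructor
        · simp
        · apply List.map_congr_left
          intro ab _
          obtain ⟨a, b⟩ := ab
          simpa [Function.comp_def] using slice_shift k (t.map Prod.fst) a b
    · rw [show ((s == "D") : Bool) = false by simp [hd]]
      rw [starts_cons_false, ends_cons_false]
      rw [R_cons_nonD _ _ _ hd, ← ih, get_d_runs_alt]
      simp only [List.zip_map, List.map_map]
      apply List.map_congr_left
      intro ab _
      obtain ⟨a, b⟩ := ab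
      simpa [Function.comp_def] using slice_shift k (t.map Prod.fst) a b

-- ===== VERDICT (by name: the statement is the Claim_ definition above) =====
theorem get_d_runs_spec : Claim_equal_get_d_runs := by
  intro es _
  unfold Spec_get_d_runs
  rw [get_d_runs_eq_R, alt_eq_R]
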